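-- pv_equiv track=rewrite | github.com/elseif/MikroTikPatch | mikro.py | mikro_softwareid_decode
-- ===== SOURCE A (Python) =====
-- SOFTWARE_ID_CHARACTER_TABLE = b'TN0BYX18S5HZ4IA67DGF3LPCJQRUK9MW2VE'
--
-- def mikro_softwareid_decode(software_id:str)->int:
--   assert(isinstance(software_id, str))
--   software_id = software_id.replace('-', '')
--   ret = 0
--   for i in reversed(range(len(software_id))):
--     ret *= len(SOFTWARE_ID_CHARACTER_TABLE)
--     ret += SOFTWARE_ID_CHARACTER_TABLE.index(ord(software_id[i]))
--   return ret
-- ===== SOURCE B (Python) =====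
-- SOFTWARE_ID_CHARACTER_TABLE = b'TN0BYX18S5HZ4IA67DGF3LPCJQRUK9MW2VE'
--
-- def mikro_softwareid_decode(software_id:str)->int:
--   assert(isinstance(software_id, str))
--   ret = 0
--   mult = 1
--   for c in software_id:
--     if c == '-':
--       continue
--     ret += SOFTWARE_ID_CHARACTER_TABLE.index(ord(c)) * mult
--     mult *= len(SOFTWARE_ID_CHARACTER_TABLE)
--   return ret
-- ===== Notes on version B (the rewrite author's own statement) =====
-- stated objective: alternative
-- what changed: Single forward pass with a running place-value multiplier (and in-loop '-' skipping) replaces the replace('-','') preprocessing plus reversed-index Horner loop.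
import Mathlib
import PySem

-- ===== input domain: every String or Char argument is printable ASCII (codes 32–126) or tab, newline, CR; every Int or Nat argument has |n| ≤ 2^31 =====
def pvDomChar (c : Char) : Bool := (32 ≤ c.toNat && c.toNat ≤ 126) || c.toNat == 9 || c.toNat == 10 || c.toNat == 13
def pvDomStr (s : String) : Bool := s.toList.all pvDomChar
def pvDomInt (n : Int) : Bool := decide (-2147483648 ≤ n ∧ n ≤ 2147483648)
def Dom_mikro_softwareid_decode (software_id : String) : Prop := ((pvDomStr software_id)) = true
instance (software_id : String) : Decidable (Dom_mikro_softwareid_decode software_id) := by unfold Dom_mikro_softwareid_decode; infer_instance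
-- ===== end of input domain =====

-- B replaces the replace('-','') + reversed-index Horner loop by one forward pass with a
-- running place-value multiplier, skipping '-' in the loop (objective: alternative decomposition).

-- SOFTWARE_ID_CHARACTER_TABLE, as the list of its byte values (shared: both Pythons use the same module constant)
def pvTable : List Nat :=
  ("TN0BYX18S5HZ4IA67DGF3LPCJQRUK9MW2VE".toList).map Char.toNat

-- SOFTWARE_ID_CHARACTER_TABLE.index(ord(c)); total form (0 where Python raises ValueError — excluded by Pre_)
def pvDigit (c : Char) : Int :=
  (((PySem.List.index? pvTable c.toNat).getD 0 : Nat) : Int)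

-- ===== PORT A =====
def mikro_softwareid_decode (software_id : String) : Int :=
  let s := (PySem.Str.replace software_id "-" "").toList
  ((PySem.List.pyRange 0 (s.length : Int) 1).reverse).foldl
    (fun ret i => ret * (pvTable.length : Int) + pvDigit (PySem.List.pyGetD s i ' ')) 0

-- ===== PORT B =====
def mikro_softwareid_decode_alt (software_id : String) : Int :=
  (software_id.toList.foldl
    (fun (p : Int × Int) c =>
      if c = '-' then p
      else (p.1 + pvDigit c * p.2, p.2 * (pvTable.length : Int)))
    (0, 1)).1

-- ===== PRECONDITION & SPEC =====
-- Pre_ excludes exactly the inputs on which the Python A raises ValueError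
-- (a non-'-' character whose code is not in the table); B raises there too.
def Pre_mikro_softwareid_decode (software_id : String) : Prop :=
  ((software_id.toList.filter (fun c => c ≠ '-')).all
    (fun c => pvTable.contains c.toNat)) = true
instance (software_id : String) : Decidable (Pre_mikro_softwareid_decode software_id) := by
  unfold Pre_mikro_softwareid_decode; infer_instance
def pvWitness_mikro_softwareid_decode : String := "D4PT-R5TW"

def Spec_mikro_softwareid_decode (software_id : String) (out : Int) : Prop := out = mikro_softwareid_decode_alt software_id
instance (software_id : String) (out : Int) : Decidable (Spec_mikro_softwareid_decode software_id out) := by unfold Spec_mikro_softwareid_decode; infer_instance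

-- ===== CLAIM (what is proved, stated in full; the proofs are below) =====
def Claim_equal_mikro_softwareid_decode : Prop := ∀ (software_id : String), Dom_mikro_softwareid_decode software_id → Pre_mikro_softwareid_decode software_id → Spec_mikro_softwareid_decode software_id (mikro_softwareid_decode software_id)

-- ===== LEMMAS AND PROOFS =====

-- abstract value: first character least significant, base 35
def pvVal : List Char → Int
  | [] => 0
  | c :: t => pvDigit c + 35 * pvVal t

theorem pvTable_length : (pvTable.length : Int) = 35 := by decide

theorem pvVal_append_singleton (l : List Char) (c : Char) :
    pvVal (l ++ [c]) = pvVal l + pvDigit c * 35 ^ l.length := by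
  induction l with
  | nil => simp [pvVal]
  | cons x t ih => simp [pvVal, ih, List.length_cons]; ring

-- the body of A's fold only reads the list at the indices supplied
theorem pvFoldA_congr (idxs : List Nat) (l l' : List Char)
    (h : ∀ i ∈ idxs, PySem.List.pyGetD l (i : Int) ' ' = PySem.List.pyGetD l' (i : Int) ' ') :
    ∀ acc : Int,
      (idxs.map (Nat.cast : Nat → Int)).foldl
        (fun ret i => ret * (pvTable.length : Int) + pvDigit (PySem.List.pyGetD l i ' ')) acc =
      (idxs.map (Nat.cast : Nat → Int)).foldl
        (fun ret i => ret * (pvTable.length : Int) + pvDigit (PySem.List.pyGetD l' i ' ')) acc := by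
  induction idxs with
  | nil => intro acc; rfl
  | cons j t ih =>
      intro acc
      simp only [List.map_cons, List.foldl_cons]
      rw [h j (by simp)]
      exact ih (fun i hi => h i (by simp [hi])) _

-- A's reversed-range Horner loop computes acc·35^n + pvVal l
theorem pvFoldA_eq (l : List Char) : ∀ acc : Int,
    ((PySem.List.pyRange 0 (l.length : Int) 1).reverse).foldl
      (fun ret i => ret * (pvTable.length : Int) + pvDigit (PySem.List.pyGetD l i ' ')) acc
    = acc * 35 ^ l.length + pvVal l := by
  induction l using List.reverseRecOn with
  | nil =>
      intro acc
      simp [pvVal]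
  | append_singleton l' c ih =>
      intro acc
      have hlen : ((l' ++ [c]).length : Int) = (l'.length : Int) + 1 := by
        simp
      rw [hlen, PySem.List.pyRange_one_succ_right (by positivity)]
      simp only [List.reverse_append, List.reverse_cons, List.reverse_nil, List.nil_append,
        List.singleton_append, List.foldl_cons]
      -- first step reads index l'.length = the appended character c
      have hc : PySem.List.pyGetD (l' ++ [c]) ((l'.length : Nat) : Int) ' ' = c := by
        simp [PySem.List.pyGetD_natCast, List.getD]
      rw [hc]
      -- remaining indices are < l'.length, so they read l'
      have hcong := pvFoldA_congr ((List.range l'.length).reverse) (l' ++ [c]) l'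
        (by
          intro i hi
          have hi' : i < l'.length := by
            simpa using (List.mem_range.mp (List.mem_reverse.mp hi))
          simp [PySem.List.pyGetD_natCast, List.getD, List.getElem?_append_left hi'])
      have hmap : (PySem.List.pyRange 0 (l'.length : Int) 1).reverse
          = ((List.range l'.length).reverse).map (Nat.cast : Nat → Int) := by
        rw [PySem.List.pyRange_one]
        simp
      rw [hmap, hcong, ← hmap, ih]
      rw [pvVal_append_singleton, pvTable_length]
      simp [pow_succ]
      ring

-- B's forward loop with multiplier, over any suffix and any accumulator pair
theorem pvFoldB_eq (l : List Char) : ∀ (r m : Int),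
    l.foldl
      (fun (p : Int × Int) c =>
        if c = '-' then p
        else (p.1 + pvDigit c * p.2, p.2 * (pvTable.length : Int)))
      (r, m)
    = (r + m * pvVal (l.filter (fun c => c ≠ '-')),
       m * 35 ^ (l.filter (fun c => c ≠ '-')).length) := by
  induction l with
  | nil => intro r m; simp [pvVal]
  | cons c t ih =>
      intro r m
      by_cases hc : c = '-'
      · simp [hc, ih]
      · simp only [List.foldl_cons, if_neg hc]
        rw [ih]
        rw [pvTable_length]
        simp [hc, pvVal, pow_succ]
        constructor
        · ring
        · ring

-- the Python-exact replace('-','') is the filter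
theorem pvReplaceGo_filter : ∀ (fuel : Nat) (l acc : List Char), l.length ≤ fuel →
    PySem.Chars.replace.go ['-'] [] fuel l acc
      = acc.reverse ++ l.filter (fun c => c ≠ '-') := by
  intro fuel
  induction fuel with
  | zero =>
      intro l acc h
      have : l = [] := List.length_eq_zero_iff.mp (Nat.le_zero.mp h)
      subst this
      simp [PySem.Chars.replace.go]
  | succ n ih =>
      intro l acc h
      cases l with
      | nil => simp [PySem.Chars.replace.go]
      | cons c t =>
          by_cases hc : c = '-'
          · subst hc
            have hpre : List.isPrefixOf ['-'] ('-' :: t) = true := by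
              simp [List.isPrefixOf]
            simp only [PySem.Chars.replace.go, hpre, if_pos, List.length_cons,
              List.length_nil, List.drop_succ_cons, List.drop_zero, List.reverse_nil,
              List.nil_append]
            rw [ih t acc (by simpa using Nat.le_of_succ_le_succ h)]
            simp
          · have hpre : List.isPrefixOf ['-'] (c :: t) = false := by
              simp [List.isPrefixOf]
              exact fun h' => hc h'.symm
            simp only [PySem.Chars.replace.go, hpre]
            rw [ih t (c :: acc) (by simpa using Nat.le_of_succ_le_succ h)]
            simp [hc]

theorem pvReplace_eq_filter (s : String) :
    (PySem.Str.replace s "-" "").toList = s.toList.filter (fun c => c ≠ '-') := by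
  rw [PySem.Str.toList_replace]
  show PySem.Chars.replace s.toList ['-'] [] = _
  rw [PySem.Chars.replace]
  simp only [List.isEmpty_cons, Bool.false_eq_true, if_false]
  exact pvReplaceGo_filter s.toList.length s.toList [] (le_refl _)

-- ===== VERDICT (by name: the statement is the Claim_ definition above) =====
theorem mikro_softwareid_decode_spec : Claim_equal_mikro_softwareid_decode := by
  intro s _ _
  unfold Spec_mikro_softwareid_decode mikro_softwareid_decode mikro_softwareid_decode_alt
  rw [pvReplace_eq_filter]
  rw [pvFoldA_eq, pvFoldB_eq]
  simp
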